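-- pv_equiv track=rewrite | github.com/anaemdsz/malha-viaria-busca-local | tcc/NetworkOptimization.py | get_density_colors
-- ===== SOURCE A (Python) =====
-- def get_density_colors (densities):
--     colors = []
--     for dens in densities:
--         if dens < 7:
--             colors.append('w')
--         elif dens < 11:
--             colors.append('b')
--         elif dens < 16:
--             colors.append('g')
--         elif dens < 22:
--             colors.append('y')
--         elif dens < 28:
--             colors.append('orange')
--         else:
--             colors.append('r')
--     return colors
-- ===== SOURCE B (Python) =====
-- _THRESHOLDS = [7, 11, 16, 22, 28]
-- _COLORS = ['w', 'b', 'g', 'y', 'orange', 'r']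
--
-- def _bisect_right(a, x):
--     lo, hi = 0, len(a)
--     while lo < hi:
--         mid = (lo + hi) // 2
--         if x < a[mid]:
--             hi = mid
--         else:
--             lo = mid + 1
--     return lo
--
-- def get_density_colors(densities):
--     return [_COLORS[_bisect_right(_THRESHOLDS, dens)] for dens in densities]
-- ===== Notes on version B (the rewrite author's own statement) =====
-- stated objective: idiomatic
-- what changed: Replaced the six-way if/elif cascade with a table-driven lookup: constant threshold and color lists plus a hand-rolled bisect_right binary search mapping each density to its color index.
import Mathlib
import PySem

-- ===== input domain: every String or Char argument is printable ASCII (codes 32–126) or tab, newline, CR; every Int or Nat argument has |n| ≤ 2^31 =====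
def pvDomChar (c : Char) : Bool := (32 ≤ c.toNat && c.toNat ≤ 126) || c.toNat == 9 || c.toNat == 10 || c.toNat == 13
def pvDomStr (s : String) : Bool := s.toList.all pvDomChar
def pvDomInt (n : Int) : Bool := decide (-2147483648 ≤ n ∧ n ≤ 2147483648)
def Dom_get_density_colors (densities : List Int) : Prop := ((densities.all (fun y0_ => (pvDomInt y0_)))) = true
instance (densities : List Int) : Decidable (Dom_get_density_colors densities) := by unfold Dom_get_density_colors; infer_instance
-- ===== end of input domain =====

-- ===== PORT A =====
-- B replaces A's if/elif cascade with a table lookup via binary search; objective: idiomatic.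
def get_density_colors (densities : List Int) : List String :=
  densities.foldl
    (fun colors dens =>
      colors ++ [if dens < 7 then "w"
                 else if dens < 11 then "b"
                 else if dens < 16 then "g"
                 else if dens < 22 then "y"
                 else if dens < 28 then "orange"
                 else "r"]) []

-- ===== PORT B =====
def pvThresholds : List Int := [7, 11, 16, 22, 28]
def pvColors : List String := ["w", "b", "g", "y", "orange", "r"]

-- the while loop of _bisect_right, fuel = hi - lo bounds the iterations (each step shrinks hi - lo)
def pvBisectAux (fuel : Nat) (a : List Int) (x : Int) (lo hi : Nat) : Nat :=
  match fuel with
  | 0 => lo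
  | fuel + 1 =>
    if lo < hi then
      let mid := (lo + hi) / 2
      if x < a.getD mid 0 then pvBisectAux fuel a x lo mid
      else pvBisectAux fuel a x (mid + 1) hi
    else lo

def pvBisectRight (a : List Int) (x : Int) : Nat :=
  pvBisectAux a.length a x 0 a.length

def get_density_colors_alt (densities : List Int) : List String :=
  densities.map (fun dens => pvColors.getD (pvBisectRight pvThresholds dens) "")

-- ===== PRECONDITION & SPEC =====
def Spec_get_density_colors (densities : List Int) (out : List String) : Prop := out = get_density_colors_alt densities
instance (densities : List Int) (out : List String) : Decidable (Spec_get_density_colors densities out) := by unfold Spec_get_density_colors; infer_instance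

-- ===== CLAIM (what is proved, stated in full; the proofs are below) =====
def Claim_equal_get_density_colors : Prop := ∀ (densities : List Int), Dom_get_density_colors densities → Spec_get_density_colors densities (get_density_colors densities)

-- ===== LEMMAS AND PROOFS =====

-- pointwise: the if/elif cascade equals the binary-search table lookup
theorem pv_point (d : Int) :
    (if d < 7 then "w"
     else if d < 11 then "b"
     else if d < 16 then "g"
     else if d < 22 then "y"
     else if d < 28 then "orange"
     else "r") = pvColors.getD (pvBisectRight pvThresholds d) "" := by
  simp only [pvBisectRight, pvThresholds, pvColors, pvBisectAux, List.getD, List.length]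
  norm_num
  split_ifs <;> simp_all <;> omega

theorem pv_foldl (l : List Int) (acc : List String) :
    l.foldl
      (fun colors dens =>
        colors ++ [if dens < 7 then "w"
                   else if dens < 11 then "b"
                   else if dens < 16 then "g"
                   else if dens < 22 then "y"
                   else if dens < 28 then "orange"
                   else "r"]) acc
    = acc ++ l.map (fun dens => pvColors.getD (pvBisectRight pvThresholds dens) "") := by
  induction l generalizing acc with
  | nil => simp
  | cons x xs ih => simp [List.foldl, ih, pv_point x]

-- ===== VERDICT (by name: the statement is the Claim_ definition above) =====
theorem get_density_colors_spec : Claim_equal_get_density_colors := by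
  intro densities _
  unfold Spec_get_density_colors get_density_colors get_density_colors_alt
  simpa using pv_foldl densities []
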